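-- pv_equiv track=rewrite | github.com/sootier/SC-Wrapper-POC | encoder.py | generate
-- ===== SOURCE A (Python) =====
-- SIZE=2
--
-- def find_key(p, k):
--     r = []
--     for i in range(SIZE):
--         r.append(chr(ord(p[i])^ord(k[i])))
--     return ''.join(r)
--
-- def generate(p): # A python implementation of the encoding process!
--     pa = []
--     k = ""
--     pn = int(len(p)/SIZE)
--     for i in range(pn):
--         pa.append(p[i*SIZE:(i+1)*SIZE])
--     k=pa[0]
--     for i in range(1,pn):
--         k+=find_key(pa[i], pa[i-1]) # "find" the appropriate key for the received blocks!
--     return k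
-- ===== SOURCE B (Python) =====
-- SIZE = 2
--
-- def generate(p):
--     limit = (len(p) // SIZE) * SIZE
--     out = [p[0], p[1]]
--     for j in range(2, limit):
--         out.append(chr(ord(p[j]) ^ ord(p[j - 2])))
--     return ''.join(out)
-- ===== Notes on version B (the rewrite author's own statement) =====
-- stated objective: simpler
-- what changed: B drops the block list and the find_key helper entirely: instead of splitting p into 2-char blocks and XOR-ing consecutive blocks, it emits p[0], p[1] and then one flat character loop appending chr(ord(p[j]) ^ ord(p[j-2])), exploiting that each output character depends only on the character two positions back.
import Mathlib
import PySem

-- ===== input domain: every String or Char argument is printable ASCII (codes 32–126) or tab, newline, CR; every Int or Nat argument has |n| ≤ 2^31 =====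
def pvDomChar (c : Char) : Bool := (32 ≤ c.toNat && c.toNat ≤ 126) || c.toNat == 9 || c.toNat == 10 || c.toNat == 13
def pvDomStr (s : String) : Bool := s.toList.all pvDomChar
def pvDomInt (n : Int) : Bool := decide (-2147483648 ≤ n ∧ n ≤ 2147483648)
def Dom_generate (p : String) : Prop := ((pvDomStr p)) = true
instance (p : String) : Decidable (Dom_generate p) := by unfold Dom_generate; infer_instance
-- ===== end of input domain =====

-- B replaces A's block-splitting + find_key helper by one flat character loop (simpler decomposition, same O(n) cost).

-- ===== PORT A =====
def find_key (p k : List Char) : List Char :=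
  (PySem.List.pyRange 0 2 1).foldl
    (fun r i =>
      r ++ [Char.ofNat ((PySem.List.pyGetD p i ' ').toNat ^^^ (PySem.List.pyGetD k i ' ').toNat)]) []

def generate (p : String) : String :=
  let cs := p.toList
  let pn : Int := PySem.Int.truncdiv (cs.length : Int) 2   -- int(len(p)/SIZE)
  let pa : List (List Char) :=
    (PySem.List.pyRange 0 pn 1).foldl
      (fun pa i => pa ++ [PySem.List.slice cs (some (i * 2)) (some ((i + 1) * 2))]) []
  -- k = pa[0]: pyGetD is exact only under Pre_generate (pn ≥ 1); Python raises IndexError otherwise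
  let k0 := PySem.List.pyGetD pa 0 []
  let k := (PySem.List.pyRange 1 pn 1).foldl
      (fun k i => k ++ find_key (PySem.List.pyGetD pa i []) (PySem.List.pyGetD pa (i - 1) [])) k0
  String.ofList k

-- ===== PORT B =====
def generate_alt (p : String) : String :=
  let cs := p.toList
  let limit : Int := PySem.Int.floordiv (cs.length : Int) 2 * 2
  -- out = [p[0], p[1]]: exact only under Pre_generate; Python raises IndexError otherwise
  let out0 : List Char := [PySem.List.pyGetD cs 0 ' ', PySem.List.pyGetD cs 1 ' ']
  let out := (PySem.List.pyRange 2 limit 1).foldl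
      (fun out j =>
        out ++ [Char.ofNat ((PySem.List.pyGetD cs j ' ').toNat ^^^ (PySem.List.pyGetD cs (j - 2) ' ').toNat)]) out0
  String.ofList out

-- ===== PRECONDITION & SPEC =====
-- Pre_ excludes only len(p) < 2, where both A and B raise IndexError (A at pa[0] of an empty block list, B at p[1]).
def Pre_generate (p : String) : Prop := 2 ≤ p.toList.length
instance (p : String) : Decidable (Pre_generate p) := by unfold Pre_generate; infer_instance

def pvWitness_generate : String := "abcdef"

def Spec_generate (p : String) (out : String) : Prop := out = generate_alt p
instance (p : String) (out : String) : Decidable (Spec_generate p out) := by unfold Spec_generate; infer_instance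

-- ===== CLAIM (what is proved, stated in full; the proofs are below) =====
def Claim_equal_generate : Prop := ∀ (p : String), Dom_generate p → Pre_generate p → Spec_generate p (generate p)

-- ===== LEMMAS AND PROOFS =====

-- the per-character XOR step B uses (exactly B's loop body function)
def pvXf (cs : List Char) (j : Int) : Char :=
  Char.ofNat ((PySem.List.pyGetD cs j ' ').toNat ^^^ (PySem.List.pyGetD cs (j - 2) ' ').toNat)

-- the i-th 2-char block A builds (exactly A's slice)
def pvBlk (cs : List Char) (i : Int) : List Char :=
  PySem.List.slice cs (some (i * 2)) (some ((i + 1) * 2))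

lemma find_key_pair (x0 x1 y0 y1 : Char) :
    find_key [x0, x1] [y0, y1] =
      [Char.ofNat (x0.toNat ^^^ y0.toNat), Char.ofNat (x1.toNat ^^^ y1.toNat)] := rfl

lemma take_two_drop (xs : List Char) (a : Nat) (h : a + 2 ≤ xs.length) :
    (xs.drop a).take 2 = [xs.getD a ' ', xs.getD (a+1) ' '] := by
  rw [List.drop_eq_getElem_cons (by omega), List.drop_eq_getElem_cons (i := a+1) (by omega)]
  rw [List.getD_eq_getElem xs ' ' (by omega), List.getD_eq_getElem xs ' ' (by omega)]
  rfl

lemma blk_eq (cs : List Char) (i : Int) (h0 : 0 ≤ i) (h2 : i * 2 + 2 ≤ (cs.length : Int)) :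
    pvBlk cs i = [cs.getD (i*2).toNat ' ', cs.getD ((i*2).toNat + 1) ' '] := by
  unfold pvBlk
  rw [PySem.List.slice_toNat cs (a := i*2) (b := (i+1)*2) (by omega) (by omega),
      show ((i+1)*2).toNat - (i*2).toNat = 2 by omega,
      take_two_drop cs (i*2).toNat (by omega)]

lemma pyGetD_eq_getD (cs : List Char) (j : Int) (h0 : 0 ≤ j) (h1 : j < (cs.length : Int)) :
    PySem.List.pyGetD cs j ' ' = cs.getD j.toNat ' ' := by
  rw [PySem.List.pyGetD_eq_getElem cs ' ' h0 h1, List.getD_eq_getElem cs ' ' (by omega)]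

-- A's find_key on consecutive blocks is B's per-character step at the block's two positions
lemma fk_blk (cs : List Char) (i : Int) (h1 : 1 ≤ i) (h2 : i * 2 + 2 ≤ (cs.length : Int)) :
    find_key (pvBlk cs i) (pvBlk cs (i-1)) = [pvXf cs (i*2), pvXf cs (i*2+1)] := by
  rw [blk_eq cs i (by omega) h2, blk_eq cs (i-1) (by omega) (by omega), find_key_pair]
  unfold pvXf
  rw [pyGetD_eq_getD cs (i*2) (by omega) (by omega),
      pyGetD_eq_getD cs (i*2-2) (by omega) (by omega),
      pyGetD_eq_getD cs (i*2+1) (by omega) (by omega),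
      pyGetD_eq_getD cs (i*2+1-2) (by omega) (by omega),
      show (i*2-2).toNat = ((i-1)*2).toNat from by omega,
      show (i*2+1).toNat = (i*2).toNat + 1 from by omega,
      show (i*2+1-2).toNat = ((i-1)*2).toNat + 1 from by omega]

-- pairing up A's block range with B's flat character range
lemma pair_range (f : Int → Char) (n : Nat) :
    (PySem.List.pyRange 1 n 1).flatMap (fun i => [f (i*2), f (i*2+1)]) =
      (PySem.List.pyRange 2 ((n:Int)*2) 1).map f := by
  induction n with
  | zero => rfl
  | succ k ih =>
    rcases Nat.eq_zero_or_pos k with hk | hk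
    · subst hk; rfl
    · have h1 : (1:Int) ≤ (k:Int) := by exact_mod_cast hk
      push_cast
      rw [PySem.List.pyRange_one_succ_right h1,
          show (((k:Int)+1)*2) = ((k:Int)*2+1)+1 by ring,
          PySem.List.pyRange_one_succ_right (by omega),
          show ((k:Int)*2+1) = ((k:Int)*2)+1 by ring,
          PySem.List.pyRange_one_succ_right (by omega)]
      push_cast at ih
      simp [ih]

lemma generate_eq_alt (p : String) (hpre : 2 ≤ p.toList.length) :
    generate p = generate_alt p := by
  unfold generate generate_alt
  dsimp only
  set cs := p.toList with hcs
  have hm : 2 ≤ cs.length := hpre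
  have htd : PySem.Int.truncdiv (cs.length : Int) 2 = ((cs.length / 2 : Nat) : Int) := by
    simp [PySem.Int.truncdiv]
  have hfd : PySem.Int.floordiv (cs.length : Int) 2 = ((cs.length / 2 : Nat) : Int) :=
    PySem.Int.floordiv_natCast _ 2
  rw [htd, hfd]
  set n := cs.length / 2 with hn
  have hn1 : 1 ≤ n := by omega
  have h2n : 2 * n ≤ cs.length := by omega
  have hblk : (fun (i : Int) => PySem.List.slice cs (some (i * 2)) (some ((i + 1) * 2))) = pvBlk cs := rfl
  rw [PySem.List.foldl_append_singleton_eq_map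
        (fun (i : Int) => PySem.List.slice cs (some (i * 2)) (some ((i + 1) * 2)))]
  rw [hblk, List.nil_append]
  rw [PySem.List.pyGetD_map_pyRange_of_nonneg (pvBlk cs) (n:Int) 0 [] le_rfl (by exact_mod_cast hn1)]
  rw [PySem.List.foldl_congr_mem _ _
        (fun k i => k ++ (fun (i : Int) => [pvXf cs (i*2), pvXf cs (i*2+1)]) i) _
        (by
          intro acc i hi
          rcases (PySem.List.mem_pyRange_one).1 hi with ⟨h1i, hin⟩
          rw [PySem.List.pyGetD_map_pyRange_of_nonneg (pvBlk cs) (n:Int) i [] (by omega) hin,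
              PySem.List.pyGetD_map_pyRange_of_nonneg (pvBlk cs) (n:Int) (i-1) [] (by omega) (by omega),
              fk_blk cs i h1i (by omega)])]
  rw [PySem.List.foldl_append_eq_flatMap (fun (i : Int) => [pvXf cs (i*2), pvXf cs (i*2+1)])]
  rw [pair_range (pvXf cs) n]
  have hxf : (fun (j : Int) =>
      Char.ofNat ((PySem.List.pyGetD cs j ' ').toNat ^^^ (PySem.List.pyGetD cs (j - 2) ' ').toNat)) = pvXf cs := rfl
  rw [PySem.List.foldl_append_singleton_eq_map
        (fun (j : Int) =>
          Char.ofNat ((PySem.List.pyGetD cs j ' ').toNat ^^^ (PySem.List.pyGetD cs (j - 2) ' ').toNat))]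
  rw [hxf]
  rw [blk_eq cs 0 le_rfl (by omega)]
  rw [pyGetD_eq_getD cs 0 le_rfl (by omega), pyGetD_eq_getD cs 1 (by omega) (by omega)]
  norm_num

-- ===== VERDICT (by name: the statement is the Claim_ definition above) =====
theorem generate_spec : Claim_equal_generate := by
  intro p _ hpre
  unfold Spec_generate
  exact generate_eq_alt p hpre
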